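-- pv_equiv track=rewrite | github.com/David22092007/AUTO-SUBTITILE-VIDEO-FREE | sourse_code_v2.py | group_consecutive_times
-- ===== SOURCE A (Python) =====
-- def group_consecutive_times(times, threshold_ms=50):
--     times.sort()
--     groups = []
--     current_group = [times[0]]
--     for t in times[1:]:
--         if t - current_group[-1] <= threshold_ms:
--             current_group.append(t)
--         else:
--             groups.append(current_group)
--             current_group = [t]
--     groups.append(current_group)
--     return groups
-- ===== SOURCE B (Python) =====
-- def group_consecutive_times(times, threshold_ms=50):
--     times.sort()
--
--     def rec(xs):
--         if not xs:
--             return []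
--         i = 1
--         while i < len(xs) and xs[i] - xs[i - 1] <= threshold_ms:
--             i += 1
--         return [xs[:i]] + rec(xs[i:])
--
--     return rec(times)
-- ===== Notes on version B (the rewrite author's own statement) =====
-- stated objective: alternative
-- what changed: A's single pass with a (groups, current_group) accumulator is replaced by a recursive run-splitting decomposition: after sorting, repeatedly split off the maximal consecutive-within-threshold run as a slice and recurse on the remainder.
-- crash fix: On an empty list A raises IndexError (times[0]); B returns [] (no times, no groups). — e.g. on group_consecutive_times([], 50): A raises IndexError, B returns []
import Mathlib
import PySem

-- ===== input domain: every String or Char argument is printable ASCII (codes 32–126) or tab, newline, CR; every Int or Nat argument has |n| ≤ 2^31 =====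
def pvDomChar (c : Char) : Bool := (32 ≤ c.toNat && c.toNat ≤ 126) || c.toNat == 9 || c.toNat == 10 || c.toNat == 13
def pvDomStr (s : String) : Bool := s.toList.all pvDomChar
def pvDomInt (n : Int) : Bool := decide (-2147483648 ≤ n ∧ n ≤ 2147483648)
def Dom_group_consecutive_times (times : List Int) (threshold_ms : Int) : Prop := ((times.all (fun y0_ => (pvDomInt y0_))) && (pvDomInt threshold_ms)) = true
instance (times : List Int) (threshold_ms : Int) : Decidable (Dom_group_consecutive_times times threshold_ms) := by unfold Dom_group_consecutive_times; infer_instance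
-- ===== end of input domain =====

-- B replaces A's accumulator fold by a recursive run-splitting decomposition (objective: alternative).
-- Both A and B sort `times` in place (same observable mutation); the equivalence proved is about the return value.

-- ===== PORT A =====
-- A: sort, then a single pass keeping (groups, current_group); current_group[-1] via pyGetD (cur nonempty throughout).
def group_consecutive_times (times : List Int) (threshold_ms : Int) : List (List Int) :=
  let s := PySem.List.sorted times (fun x => x) false
  match s with
  | [] => []   -- Python raises IndexError (times[0]) here; excluded by Pre_
  | t0 :: rest =>
    let st := rest.foldl (fun (st : List (List Int) × List Int) t =>
      if t - PySem.List.pyGetD st.2 (-1) 0 ≤ threshold_ms then (st.1, st.2 ++ [t])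
      else (st.1 ++ [st.2], [t])) ([], [t0])
    st.1 ++ [st.2]

-- ===== PORT B =====
-- B helper: the while loop of Source B's `rec`: given the previous element, split off the elements
-- that continue the current run (xs[:i-1] of the tail) from the remainder (xs[i:]).
def pvSplit (threshold_ms : Int) (prev : Int) : List Int → List Int × List Int
  | [] => ([], [])
  | x :: xs =>
    if x - prev ≤ threshold_ms then
      let p := pvSplit threshold_ms x xs
      (x :: p.1, p.2)
    else ([], x :: xs)

-- B helper: Source B's `rec` — split off the first run, recurse on the remainder.
-- The fuel argument (the input's length suffices) only makes the recursion structural.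
def pvRecFuel (threshold_ms : Int) : Nat → List Int → List (List Int)
  | _, [] => []
  | 0, _ :: _ => []   -- unreachable when fuel ≥ length
  | fuel + 1, x :: xs =>
    let p := pvSplit threshold_ms x xs
    (x :: p.1) :: pvRecFuel threshold_ms fuel p.2

def group_consecutive_times_alt (times : List Int) (threshold_ms : Int) : List (List Int) :=
  let s := PySem.List.sorted times (fun x => x) false
  pvRecFuel threshold_ms s.length s

-- ===== PRECONDITION & SPEC =====
-- Pre_ excludes only the empty list, on which A raises IndexError (times[0]).
def Pre_group_consecutive_times (times : List Int) (threshold_ms : Int) : Prop := times ≠ []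
instance (times : List Int) (threshold_ms : Int) : Decidable (Pre_group_consecutive_times times threshold_ms) := by unfold Pre_group_consecutive_times; infer_instance
def pvWitness_group_consecutive_times : List Int × Int := ([0, 130, 100, 30], 50)

-- On the empty list A raises IndexError while B returns the natural answer [] (no times, no groups).
def Raises_group_consecutive_times (times : List Int) (threshold_ms : Int) : Prop := times = []
instance (times : List Int) (threshold_ms : Int) : Decidable (Raises_group_consecutive_times times threshold_ms) := by unfold Raises_group_consecutive_times; infer_instance
def pvRaiseWitness_group_consecutive_times : List Int × Int := ([], 50)
def pvRaiseWitnessOut_group_consecutive_times : List (List Int) := []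

def Spec_group_consecutive_times (times : List Int) (threshold_ms : Int) (out : List (List Int)) : Prop := out = group_consecutive_times_alt times threshold_ms
instance (times : List Int) (threshold_ms : Int) (out : List (List Int)) : Decidable (Spec_group_consecutive_times times threshold_ms out) := by unfold Spec_group_consecutive_times; infer_instance

-- ===== CLAIM (what is proved, stated in full; the proofs are below) =====
def Claim_equal_group_consecutive_times : Prop := ∀ (times : List Int) (threshold_ms : Int), Dom_group_consecutive_times times threshold_ms → Pre_group_consecutive_times times threshold_ms → Spec_group_consecutive_times times threshold_ms (group_consecutive_times times threshold_ms)
def Claim_raises_group_consecutive_times : Prop := (∀ (times : List Int) (threshold_ms : Int), Dom_group_consecutive_times times threshold_ms → Raises_group_consecutive_times times threshold_ms → ¬ Pre_group_consecutive_times times threshold_ms) ∧ (Dom_group_consecutive_times (pvRaiseWitness_group_consecutive_times.1) (pvRaiseWitness_group_consecutive_times.2) ∧ Raises_group_consecutive_times (pvRaiseWitness_group_consecutive_times.1) (pvRaiseWitness_group_consecutive_times.2) ∧ group_consecutive_times_alt (pvRaiseWitness_group_consecutive_times.1) (pvRaiseWitness_group_consecutive_times.2) = pvRaiseWitnessOu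t_group_consecutive_times)

-- ===== LEMMAS AND PROOFS =====

lemma pvSplit_snd_length_le (tms : Int) : ∀ (prev : Int) (xs : List Int),
    (pvSplit tms prev xs).2.length ≤ xs.length := by
  intro prev xs
  induction xs generalizing prev with
  | nil => simp [pvSplit]
  | cons x xs ih =>
    simp only [pvSplit]
    split
    · exact le_trans (ih x) (by simp)
    · simp

-- pvRecFuel does not depend on the fuel once the fuel covers the list length.
lemma pvRecFuel_congr (tms : Int) : ∀ (f g : Nat) (l : List Int), l.length ≤ f → l.length ≤ g →
    pvRecFuel tms f l = pvRecFuel tms g l := by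
  intro f
  induction f with
  | zero =>
    intro g l hf _
    cases l with
    | nil => cases g <;> rfl
    | cons x xs => simp at hf
  | succ f ih =>
    intro g l hf hg
    cases l with
    | nil => cases g <;> rfl
    | cons x xs =>
      cases g with
      | zero => simp at hg
      | succ g =>
        simp only [pvRecFuel]
        have hx := pvSplit_snd_length_le tms x xs
        have := ih g (pvSplit tms x xs).2 (by simp at hf; omega) (by simp at hg; omega)
        rw [this]

lemma pvRec_cons (tms x : Int) (xs : List Int) :
    pvRecFuel tms (x :: xs).length (x :: xs)
      = (x :: (pvSplit tms x xs).1) :: pvRecFuel tms (pvSplit tms x xs).2.length (pvSplit tms x xs).2 := by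
  simp only [List.length_cons, pvRecFuel]
  rw [pvRecFuel_congr tms xs.length (pvSplit tms x xs).2.length (pvSplit tms x xs).2
      (pvSplit_snd_length_le tms x xs) le_rfl]

-- A's fold, started from any (groups, cur) with cur ending in x, produces groups ++ the
-- run-splitting of the remaining input (with cur prefixed to the first run).
lemma pv_fold_aux (tms : Int) : ∀ (xs : List Int) (groups : List (List Int)) (cur : List Int) (x : Int),
    PySem.List.pyGetD cur (-1) 0 = x →
    (let st := xs.foldl (fun (st : List (List Int) × List Int) t =>
        if t - PySem.List.pyGetD st.2 (-1) 0 ≤ tms then (st.1, st.2 ++ [t])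
        else (st.1 ++ [st.2], [t])) (groups, cur)
     st.1 ++ [st.2])
    = groups ++ (cur ++ (pvSplit tms x xs).1) :: pvRecFuel tms (pvSplit tms x xs).2.length (pvSplit tms x xs).2 := by
  intro xs
  induction xs with
  | nil => intro groups cur x h; simp [pvSplit, pvRecFuel]
  | cons t ts ih =>
    intro groups cur x h
    simp only [List.foldl_cons, h, pvSplit]
    by_cases hc : t - x ≤ tms
    · simp only [if_pos hc]
      have := ih groups (cur ++ [t]) t (PySem.List.pyGetD_neg_one_append_singleton ..)
      simp only [this]
      simp [List.append_assoc]
    · simp only [if_neg hc]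
      have := ih (groups ++ [cur]) [t] t (by simp [PySem.List.pyGetD, PySem.List.pyGet?_neg_one])
      simp only [this]
      rw [pvRec_cons]
      simp

-- ===== VERDICT (by name: the statement is the Claim_ definition above) =====
theorem group_consecutive_times_spec : Claim_equal_group_consecutive_times := by
  intro times tms _ hpre
  unfold Spec_group_consecutive_times group_consecutive_times group_consecutive_times_alt
  cases hs : PySem.List.sorted times (fun x => x) false with
  | nil =>
    have hp := PySem.List.sorted_perm times (fun x : Int => x) false
    rw [hs] at hp
    exact absurd hp.nil_eq.symm hpre
  | cons t0 rest =>
    simp only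
    rw [pv_fold_aux tms rest [] [t0] t0 (by simp [PySem.List.pyGetD, PySem.List.pyGet?_neg_one]),
        pvRec_cons]
    simp

theorem group_consecutive_times_raises : Claim_raises_group_consecutive_times := by
  unfold Claim_raises_group_consecutive_times
  refine ⟨fun times tms _ hr => ?_, by decide⟩
  simp [Raises_group_consecutive_times] at hr
  simp [Pre_group_consecutive_times, hr]

-- self-check: the raise witness satisfies Dom/Raises and B's port returns the stated literal there
theorem group_consecutive_times_raises_ok : Dom_group_consecutive_times (pvRaiseWitness_group_consecutive_times.1) (pvRaiseWitness_group_consecutive_times.2) ∧ Raises_group_consecutive_times (pvRaiseWitness_group_consecutive_times.1) (pvRaiseWitness_group_consecutive_times.2) ∧ group_consecutive_times_alt (pvRaiseWitness_group_consecutive_times.1) (pvRaiseWitness_group_consecutive_times.2) = pvRaiseWitnessOut_group_consecutive_times :=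
  group_consecutive_times_raises.2
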